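-- pv_equiv track=rewrite | github.com/asi-alliance/OmegaClaw-Core | lib_llm_ext.py | _find_balanced_block
-- ===== SOURCE A (Python) =====
-- def _find_balanced_block(text):
--     """Find the first balanced {...} or [...] block whose opening brace is
--        outside any double-quoted string. Returns the substring or None."""
--     in_str = False
--     esc = False
--     depth = 0
--     start = -1
--     open_ch = ""
--     for i, c in enumerate(text):
--         if esc:
--             esc = False
--             continue
--         if c == '\\':
--             esc = True
--             continue
--         if c == '"':
--             in_str = not in_str
--             continue
--         if in_str:
--             continue
--         if depth == 0 and c in "{[":
--             start = i
--             open_ch = c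
--             depth = 1
--             continue
--         if depth > 0:
--             if c == open_ch:
--                 depth += 1
--             elif (open_ch == "{" and c == "}") or (open_ch == "[" and c == "]"):
--                 depth -= 1
--                 if depth == 0:
--                     return text[start:i + 1]
--     return None
-- ===== SOURCE B (Python) =====
-- def _scan_close(text, start, open_ch, close_ch, code, k):
--     """Scan the visible characters after the opener, tracking nesting depth."""
--     depth = 1
--     for j in range(k, len(code)):
--         i, c = code[j]
--         if c == open_ch:
--             depth += 1
--         elif c == close_ch:
--             if depth == 1:
--                 return text[start:i + 1]
--             depth -= 1
--     return None
--
--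
-- def _find_balanced_block(text):
--     """Two passes: first collect the 'visible' characters (outside strings,
--     not quotes/backslashes/escaped) with their indices, then find the first
--     opener among them and scan for its matching close."""
--     code = []
--     in_str = False
--     esc = False
--     for i, c in enumerate(text):
--         if esc:
--             esc = False
--         elif c == '\\':
--             esc = True
--         elif c == '"':
--             in_str = not in_str
--         elif not in_str:
--             code.append((i, c))
--     for k, (i, c) in enumerate(code):
--         if c == '{':
--             return _scan_close(text, i, '{', '}', code, k + 1)
--         if c == '[':
--             return _scan_close(text, i, '[', ']', code, k + 1)
--     return None
-- ===== Notes on version B (the rewrite author's own statement) =====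
-- stated objective: alternative
-- what changed: A's single five-state loop is split into two passes: pass one filters out quotes, backslashes, escaped and in-string characters (keeping original indices), pass two finds the first opener among the visible characters and scans for its matching close with a plain depth counter.
import Mathlib
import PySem

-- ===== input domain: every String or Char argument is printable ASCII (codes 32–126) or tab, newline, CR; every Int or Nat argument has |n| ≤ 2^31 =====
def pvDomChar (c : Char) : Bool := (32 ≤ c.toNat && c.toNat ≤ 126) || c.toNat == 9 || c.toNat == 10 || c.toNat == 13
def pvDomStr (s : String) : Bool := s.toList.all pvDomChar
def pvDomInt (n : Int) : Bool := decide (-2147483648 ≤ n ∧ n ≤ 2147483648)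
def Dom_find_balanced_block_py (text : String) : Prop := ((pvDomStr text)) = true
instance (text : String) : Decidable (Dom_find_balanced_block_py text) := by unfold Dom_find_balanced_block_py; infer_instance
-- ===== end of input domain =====

-- B replaces A's single five-state loop by a filter pass (visible characters) plus a
-- find-first-opener-and-scan pass over them; same result, alternative decomposition.

-- ===== PORT A =====
-- A's single loop; Python's open_ch string ("" initially, a one-char string once set)
-- is ported as Option Char (none ↔ "").
def goA (text : String) : List (Int × Char) → Bool → Bool → Int → Int → Option Char → Option String
  | [], _, _, _, _, _ => none
  | (i, c) :: rest, in_str, esc, depth, start, open_ch =>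
    if esc then goA text rest in_str false depth start open_ch
    else if c = '\\' then goA text rest in_str true depth start open_ch
    else if c = '"' then goA text rest (!in_str) esc depth start open_ch
    else if in_str then goA text rest in_str esc depth start open_ch
    else if depth = 0 ∧ (c = '{' ∨ c = '[') then goA text rest in_str esc 1 i (some c)
    else if depth > 0 then
      if some c = open_ch then goA text rest in_str esc (depth + 1) start open_ch
      else if (open_ch = some '{' ∧ c = '}') ∨ (open_ch = some '[' ∧ c = ']') then
        if depth - 1 = 0 then some (String.ofList (PySem.List.slice text.toList (some start) (some (i + 1))))
        else goA text rest in_str esc (depth - 1) start open_ch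
      else goA text rest in_str esc depth start open_ch
    else goA text rest in_str esc depth start open_ch

def find_balanced_block_py (text : String) : Option String :=
  goA text (PySem.List.enumerate text.toList) false false 0 (-1) none

-- ===== PORT B =====
-- pass one: collect the indexed characters that are outside strings and not
-- quotes / backslashes / escaped characters.
def bPass1 : List (Int × Char) → Bool → Bool → List (Int × Char)
  | [], _, _ => []
  | (i, c) :: rest, in_str, esc =>
    if esc then bPass1 rest in_str false
    else if c = '\\' then bPass1 rest in_str true
    else if c = '"' then bPass1 rest (!in_str) esc
    else if !in_str then (i, c) :: bPass1 rest in_str esc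
    else bPass1 rest in_str esc

-- _scan_close: scan the visible characters after the opener, tracking depth.
def bScan (text : String) (start : Int) (oc cc : Char) : List (Int × Char) → Int → Option String
  | [], _ => none
  | (i, c) :: rest, depth =>
    if c = oc then bScan text start oc cc rest (depth + 1)
    else if c = cc then
      if depth = 1 then some (String.ofList (PySem.List.slice text.toList (some start) (some (i + 1))))
      else bScan text start oc cc rest (depth - 1)
    else bScan text start oc cc rest depth

-- pass two: find the first opener among the visible characters.
def bFind (text : String) : List (Int × Char) → Option String
  | [] => none
  | (i, c) :: rest =>
    if c = '{' then bScan text i '{' '}' rest 1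
    else if c = '[' then bScan text i '[' ']' rest 1
    else bFind text rest

def find_balanced_block_py_alt (text : String) : Option String :=
  bFind text (bPass1 (PySem.List.enumerate text.toList) false false)

-- ===== PRECONDITION & SPEC =====
def Spec_find_balanced_block_py (text : String) (out : Option String) : Prop := out = find_balanced_block_py_alt text
instance (text : String) (out : Option String) : Decidable (Spec_find_balanced_block_py text out) := by unfold Spec_find_balanced_block_py; infer_instance

-- ===== CLAIM (what is proved, stated in full; the proofs are below) =====
def Claim_equal_find_balanced_block_py : Prop := ∀ (text : String), Dom_find_balanced_block_py text → Spec_find_balanced_block_py text (find_balanced_block_py text)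

-- ===== LEMMAS AND PROOFS =====

-- once a block is open, A's loop computes exactly B's _scan_close over the visible tail
lemma scan_eq (text : String) (oc cc : Char)
    (hocc : (oc = '{' ∧ cc = '}') ∨ (oc = '[' ∧ cc = ']')) :
    ∀ (l : List (Int × Char)) (s e : Bool) (start d : Int), 1 ≤ d →
      goA text l s e d start (some oc) = bScan text start oc cc (bPass1 l s e) d := by
  intro l
  induction l with
  | nil => intro s e start d _; simp [goA, bPass1, bScan]
  | cons p rest ih =>
    obtain ⟨i, c⟩ := p
    intro s e start d hd
    simp only [goA, bPass1]
    by_cases he : e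
    · simp [he]; exact ih _ _ _ _ hd
    by_cases hbs : c = '\\'
    · simp [he, hbs]; exact ih _ _ _ _ hd
    by_cases hq : c = '"'
    · simp [he, hbs, hq]; exact ih _ _ _ _ hd
    by_cases hs : s
    · simp [he, hbs, hq, hs]; exact ih _ _ _ _ hd
    -- visible character
    have hno : ¬(d = 0 ∧ (c = '{' ∨ c = '[')) := fun h => absurd h.1 (by omega)
    have hpos : d > 0 := by omega
    have hclose : ((oc = '{' ∧ c = '}') ∨ (oc = '[' ∧ c = ']')) ↔ c = cc := by
      rcases hocc with ⟨h1, h2⟩ | ⟨h1, h2⟩ <;> subst h1 <;> subst h2 <;> simp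
    by_cases hco : c = oc
    · subst hco
      simp [he, hbs, hq, hs, hno, hpos, bScan]
      exact ih _ _ _ _ (by omega)
    by_cases hcc : c = cc
    · subst hcc
      have hclose' : (oc = '{' ∧ c = '}') ∨ (oc = '[' ∧ c = ']') := hclose.mpr rfl
      by_cases hd1 : d = 1
      · subst hd1
        simp [he, hbs, hq, hs, hno, hpos, hco, hclose', bScan]
      · simp [he, hbs, hq, hs, hno, hpos, hco, hclose', bScan,
          show d - 1 ≠ 0 by omega, hd1]
        exact ih _ _ _ _ (by omega)
    · have hncl : ¬((oc = '{' ∧ c = '}') ∨ (oc = '[' ∧ c = ']')) := fun h => hcc (hclose.mp h)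
      simp [he, hbs, hq, hs, hno, hpos, hco, hcc, hncl, bScan]
      exact ih _ _ _ _ hd

-- while no opener has been seen (depth 0), A's loop computes B's opener search
lemma find_eq (text : String) :
    ∀ (l : List (Int × Char)) (s e : Bool) (start : Int) (oc : Option Char),
      goA text l s e 0 start oc = bFind text (bPass1 l s e) := by
  intro l
  induction l with
  | nil => intro s e start oc; simp [goA, bPass1, bFind]
  | cons p rest ih =>
    obtain ⟨i, c⟩ := p
    intro s e start oc
    simp only [goA, bPass1]
    by_cases he : e
    · simp [he]; exact ih _ _ _ _
    by_cases hbs : c = '\\'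
    · simp [he, hbs]; exact ih _ _ _ _
    by_cases hq : c = '"'
    · simp [he, hbs, hq]; exact ih _ _ _ _
    by_cases hs : s
    · simp [he, hbs, hq, hs]; exact ih _ _ _ _
    by_cases hc1 : c = '{'
    · simp [he, hbs, hq, hs, hc1, bFind]
      exact scan_eq text '{' '}' (Or.inl ⟨rfl, rfl⟩) rest _ _ i 1 (by omega)
    by_cases hc2 : c = '['
    · simp [he, hbs, hq, hs, hc1, hc2, bFind]
      exact scan_eq text '[' ']' (Or.inr ⟨rfl, rfl⟩) rest _ _ i 1 (by omega)
    · simp [he, hbs, hq, hs, hc1, hc2, bFind]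
      exact ih _ _ _ _

-- ===== VERDICT (by name: the statement is the Claim_ definition above) =====
theorem find_balanced_block_py_spec : Claim_equal_find_balanced_block_py := by
  intro text _
  unfold Spec_find_balanced_block_py find_balanced_block_py find_balanced_block_py_alt
  exact find_eq text _ false false (-1) none
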